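-- pv_equiv track=rewrite | github.com/sidb95/code-problems | hackerrank/practice/funny-string.py | funnyString
-- ===== SOURCE A (Python) =====
-- def funnyString(s):
--     n = len(s)
--     sr = s[::-1]
--     v1 = []
--     v2 = []
--     for i in range(1, n):
--         v1.append(abs(ord(s[i]) - ord(s[i - 1])))
--         v2.append(abs(ord(sr[i]) - ord(sr[i - 1])))
--     if (v1 == v2):
--         return "Funny"
--     else:
--         return "Not Funny"
-- ===== SOURCE B (Python) =====
-- def funnyString(s):
--     n = len(s)
--     for k in range((n - 1) // 2):
--         if abs(ord(s[k + 1]) - ord(s[k])) != abs(ord(s[n - 1 - k]) - ord(s[n - 2 - k])):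
--             return "Not Funny"
--     return "Funny"
-- ===== Notes on version B (the rewrite author's own statement) =====
-- stated objective: faster
-- what changed: B builds no lists at all: instead of constructing the reversed string and two difference lists and comparing them, it does a single half-length two-pointer scan comparing each adjacent difference with its mirrored counterpart, returning at the first mismatch (O(1) extra space, early exit).
import Mathlib
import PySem

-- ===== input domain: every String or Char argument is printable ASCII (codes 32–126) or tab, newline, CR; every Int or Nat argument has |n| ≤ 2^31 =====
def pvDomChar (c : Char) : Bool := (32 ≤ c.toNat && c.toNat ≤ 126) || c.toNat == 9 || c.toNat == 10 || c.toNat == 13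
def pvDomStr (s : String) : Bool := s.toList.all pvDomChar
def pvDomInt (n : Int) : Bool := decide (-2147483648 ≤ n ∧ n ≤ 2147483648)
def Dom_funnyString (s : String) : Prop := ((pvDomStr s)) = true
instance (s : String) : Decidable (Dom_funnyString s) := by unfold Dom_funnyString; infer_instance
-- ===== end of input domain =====

-- B replaces A's reversed string + two difference lists with a list-free two-pointer half
-- scan comparing each adjacent difference with its mirrored one, exiting at the first
-- mismatch; the return value is identical (no speed claim).

-- ===== PORT A =====
def funnyString (s : String) : String :=
  let cs := s.toList
  let n : Int := cs.length
  let sr := (PySem.List.slice? cs none none (-1)).getD []   -- s[::-1]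
  let vv := (PySem.List.pyRange 1 n 1).foldl
    (fun (acc : List Int × List Int) i =>
      (acc.1 ++ [|((PySem.List.pyGetD cs i ' ').toNat : Int) - ((PySem.List.pyGetD cs (i - 1) ' ').toNat : Int)|],
       acc.2 ++ [|((PySem.List.pyGetD sr i ' ').toNat : Int) - ((PySem.List.pyGetD sr (i - 1) ' ').toNat : Int)|]))
    ([], [])
  if vv.1 = vv.2 then "Funny" else "Not Funny"

-- ===== PORT B =====
/-- B's loop: k is the left pointer, r the number of remaining iterations
(Python's `for k in range((n-1)//2)` with early `return "Not Funny"`). -/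
def funnyLoop (cs : List Char) (n : Nat) (k : Nat) : Nat → String
  | 0 => "Funny"
  | r + 1 =>
    if |((cs.getD (k + 1) ' ').toNat : Int) - ((cs.getD k ' ').toNat : Int)| ≠
       |((cs.getD (n - 1 - k) ' ').toNat : Int) - ((cs.getD (n - 2 - k) ' ').toNat : Int)| then
      "Not Funny"
    else
      funnyLoop cs n (k + 1) r

def funnyString_alt (s : String) : String :=
  let cs := s.toList
  let n := cs.length
  funnyLoop cs n 0 ((n - 1) / 2)

-- ===== PRECONDITION & SPEC =====
def Spec_funnyString (s : String) (out : String) : Prop := out = funnyString_alt s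
instance (s : String) (out : String) : Decidable (Spec_funnyString s out) := by unfold Spec_funnyString; infer_instance

-- ===== CLAIM (what is proved, stated in full; the proofs are below) =====
def Claim_equal_funnyString : Prop := ∀ (s : String), Dom_funnyString s → Spec_funnyString s (funnyString s)

-- ===== LEMMAS AND PROOFS =====

/-- one adjacent difference |ord s[i] - ord s[i-1]| (proof helper, Int index, A side) -/
def pvDAt (cs : List Char) (i : Int) : Int :=
  |((PySem.List.pyGetD cs i ' ').toNat : Int) - ((PySem.List.pyGetD cs (i - 1) ' ').toNat : Int)|

/-- the adjacent-difference list A builds (proof helper) -/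
def pvDiffs (cs : List Char) : List Int :=
  (PySem.List.pyRange 1 (cs.length : Int) 1).map (fun i => pvDAt cs i)

/-- the adjacent difference at Nat index j, as B reads it -/
def pvD (cs : List Char) (j : Nat) : Int :=
  |((cs.getD (j + 1) ' ').toNat : Int) - ((cs.getD j ' ').toNat : Int)|

theorem pvDiffs_eq_range (cs : List Char) :
    pvDiffs cs = (List.range (cs.length - 1)).map (fun k : Nat => pvDAt cs (1 + (k : Int))) := by
  unfold pvDiffs
  rw [PySem.List.pyRange_one, List.map_map,
      show ((cs.length : Int) - 1).toNat = cs.length - 1 from by omega]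
  rfl

theorem pvDAt_natCast (cs : List Char) (k : Nat) (hk : k + 1 < cs.length) :
    pvDAt cs (1 + (k : Int)) = |((cs[k + 1]'hk).toNat : Int) - ((cs[k]'(by omega)).toNat : Int)| := by
  unfold pvDAt
  have e1 : (1 : Int) + (k : Int) = ((k + 1 : Nat) : Int) := by push_cast; ring
  rw [e1]
  rw [show ((k + 1 : Nat) : Int) - 1 = ((k : Nat) : Int) from by push_cast; ring]
  rw [PySem.List.pyGetD_natCast, PySem.List.pyGetD_natCast]
  rw [List.getD_eq_getElem cs ' ' hk, List.getD_eq_getElem cs ' ' (by omega : k < cs.length)]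

theorem pvDAt_eq_pvD (cs : List Char) (k : Nat) (hk : k + 1 < cs.length) :
    pvDAt cs (1 + (k : Int)) = pvD cs k := by
  rw [pvDAt_natCast cs k hk]
  unfold pvD
  rw [List.getD_eq_getElem cs ' ' hk, List.getD_eq_getElem cs ' ' (by omega : k < cs.length)]

theorem pvDiffs_reverse (cs : List Char) : pvDiffs cs.reverse = (pvDiffs cs).reverse := by
  rw [pvDiffs_eq_range, pvDiffs_eq_range, List.length_reverse]
  apply List.ext_getElem
  · simp
  · intro k h1 h2
    have hk : k < cs.length - 1 := by simpa using h1
    have hn : 2 ≤ cs.length := by omega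
    rw [List.getElem_map]
    rw [List.getElem_reverse, List.getElem_map]
    simp only [List.getElem_range]
    rw [pvDAt_natCast cs.reverse k (by rw [List.length_reverse]; omega)]
    have hrk : (List.map (fun k : Nat => pvDAt cs (1 + (k : Int))) (List.range (cs.length - 1))).length - 1 - k
        = cs.length - 2 - k := by simp; omega
    rw [hrk]
    rw [pvDAt_natCast cs (cs.length - 2 - k) (by omega)]
    have g1 : cs.reverse[k + 1]'(by simp; omega) = cs[cs.length - 2 - k]'(by omega) := by
      rw [List.getElem_reverse]; congr 1; omega
    have g2 : cs.reverse[k]'(by simp; omega) = cs[cs.length - 1 - k]'(by omega) := by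
      rw [List.getElem_reverse]
    have g3 : cs[cs.length - 2 - k + 1]'(by omega) = cs[cs.length - 1 - k]'(by omega) := by
      congr 1; omega
    rw [g1, g2, g3]
    exact abs_sub_comm _ _

theorem funnyString_eq (s : String) :
    funnyString s = if pvDiffs s.toList = (pvDiffs s.toList).reverse then "Funny" else "Not Funny" := by
  unfold funnyString
  simp only [PySem.List.slice?_none_none_neg_one, Option.getD_some]
  rw [PySem.List.foldl_prod_mk
      (fun (a : List Int) (i : Int) => a ++ [|((PySem.List.pyGetD s.toList i ' ').toNat : Int) - ((PySem.List.pyGetD s.toList (i - 1) ' ').toNat : Int)|])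
      (fun (a : List Int) (i : Int) => a ++ [|((PySem.List.pyGetD s.toList.reverse i ' ').toNat : Int) - ((PySem.List.pyGetD s.toList.reverse (i - 1) ' ').toNat : Int)|])]
  rw [PySem.List.foldl_append_singleton_eq_map, PySem.List.foldl_append_singleton_eq_map]
  have h2 : (PySem.List.pyRange 1 (s.toList.length : Int) 1).map
      (fun i => |((PySem.List.pyGetD s.toList.reverse i ' ').toNat : Int) - ((PySem.List.pyGetD s.toList.reverse (i - 1) ' ').toNat : Int)|)
      = pvDiffs s.toList.reverse := by
    unfold pvDiffs pvDAt; rw [List.length_reverse]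
  have h1 : (PySem.List.pyRange 1 (s.toList.length : Int) 1).map
      (fun i => |((PySem.List.pyGetD s.toList i ' ').toNat : Int) - ((PySem.List.pyGetD s.toList (i - 1) ' ').toNat : Int)|)
      = pvDiffs s.toList := by
    unfold pvDiffs pvDAt; rfl
  rw [h1, h2, pvDiffs_reverse]
  simp only [List.nil_append]
  rfl

/-- B's loop succeeds iff every checked pair of mirrored differences agrees
(the bound keeps every visited k strictly below (n-1)/2, as in B's range). -/
theorem funnyLoop_eq_Funny_iff (cs : List Char) (n : Nat) (r : Nat) :
    ∀ k, k + r ≤ (n - 1) / 2 →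
      (funnyLoop cs n k r = "Funny" ↔ ∀ j, k ≤ j → j < k + r → pvD cs j = pvD cs (n - 2 - j)) := by
  induction r with
  | zero =>
    intro k _
    simp [funnyLoop]
    intro j h1 h2; omega
  | succ r ih =>
    intro k hb
    have hn : k + 2 ≤ n := by omega
    have e : n - 2 - k + 1 = n - 1 - k := by omega
    unfold funnyLoop
    by_cases h : pvD cs k = pvD cs (n - 2 - k)
    · have hd : |((cs.getD (k + 1) ' ').toNat : Int) - ((cs.getD k ' ').toNat : Int)| =
          |((cs.getD (n - 1 - k) ' ').toNat : Int) - ((cs.getD (n - 2 - k) ' ').toNat : Int)| := by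
        have := h; unfold pvD at this; rw [e] at this; exact this
      rw [if_neg (by simpa using hd)]
      rw [ih (k + 1) (by omega)]
      constructor
      · intro hall j h1 h2
        rcases Nat.eq_or_lt_of_le h1 with rfl | hlt
        · exact h
        · exact hall j hlt (by omega)
      · intro hall j h1 h2
        exact hall j (by omega) (by omega)
    · have hd : ¬ (|((cs.getD (k + 1) ' ').toNat : Int) - ((cs.getD k ' ').toNat : Int)| =
          |((cs.getD (n - 1 - k) ' ').toNat : Int) - ((cs.getD (n - 2 - k) ' ').toNat : Int)|) := by
        intro hc; apply h; unfold pvD; rw [e]; exact hc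
      rw [if_pos (by simpa using hd)]
      constructor
      · intro hc; exact absurd hc (by decide)
      · intro hall
        exact absurd (hall k (le_refl k) (by omega)) h

/-- the loop only ever returns "Funny" or "Not Funny" -/
theorem funnyLoop_cases (cs : List Char) (n : Nat) (r : Nat) :
    ∀ k, funnyLoop cs n k r = "Funny" ∨ funnyLoop cs n k r = "Not Funny" := by
  induction r with
  | zero => intro k; left; rfl
  | succ r ih =>
    intro k
    unfold funnyLoop
    split
    · right; rfl
    · exact ih (k + 1)

/-- the diff list is a palindrome iff all mirrored pairs in the first half agree -/
theorem palindrome_iff_half (cs : List Char) :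
    (pvDiffs cs = (pvDiffs cs).reverse ↔
      ∀ j, j < (cs.length - 1) / 2 → pvD cs j = pvD cs (cs.length - 2 - j)) := by
  set m := cs.length - 1 with hm
  have hlen : (pvDiffs cs).length = m := by
    rw [pvDiffs_eq_range]; simp [hm]
  have hget? : ∀ (j : Nat), j < m → (pvDiffs cs)[j]? = some (pvD cs j) := by
    intro j h
    rw [pvDiffs_eq_range, List.getElem?_map,
        List.getElem?_range (show j < cs.length - 1 from by omega)]
    simp only [Option.map_some]
    exact congrArg some (pvDAt_eq_pvD cs j (by omega))
  constructor
  · intro hp j hj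
    have h1 : j < m := by omega
    have h2 : m - 1 - j < m := by omega
    have := congrArg (fun l => l[j]?) hp
    simp only at this
    rw [List.getElem?_reverse (by omega : j < (pvDiffs cs).length)] at this
    rw [hget? j h1, show (pvDiffs cs).length - 1 - j = m - 1 - j from by omega,
        hget? (m - 1 - j) h2] at this
    rw [show cs.length - 2 - j = m - 1 - j from by omega]
    exact Option.some.inj this
  · intro hh
    have hall : ∀ j, j < m → pvD cs j = pvD cs (m - 1 - j) := by
      intro j hj
      by_cases hc : j < m / 2
      · have := hh j (by omega)
        rw [show cs.length - 2 - j = m - 1 - j from by omega] at this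
        exact this
      · by_cases hc2 : m - 1 - j < m / 2
        · have := hh (m - 1 - j) (by omega)
          rw [show cs.length - 2 - (m - 1 - j) = j from by omega] at this
          exact this.symm
        · rw [show m - 1 - j = j from by omega]
    apply List.ext_getElem?
    intro j
    by_cases hj : j < m
    · rw [List.getElem?_reverse (by omega : j < (pvDiffs cs).length)]
      rw [hget? j hj, show (pvDiffs cs).length - 1 - j = m - 1 - j from by omega,
          hget? (m - 1 - j) (by omega)]
      exact congrArg some (hall j hj)
    · rw [List.getElem?_eq_none (by omega), List.getElem?_eq_none (by simp; omega)]

-- ===== VERDICT (by name: the statement is the Claim_ definition above) =====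
theorem funnyString_spec : Claim_equal_funnyString := by
  intro s _
  unfold Spec_funnyString funnyString_alt
  rw [funnyString_eq]
  have hiff := funnyLoop_eq_Funny_iff s.toList s.toList.length ((s.toList.length - 1) / 2) 0 (by omega)
  have hpal := palindrome_iff_half s.toList
  by_cases hp : pvDiffs s.toList = (pvDiffs s.toList).reverse
  · rw [if_pos hp]
    symm
    rw [hiff]
    intro j _ h2
    have := hpal.mp hp j (by omega)
    exact this
  · rw [if_neg hp]
    rcases funnyLoop_cases s.toList s.toList.length ((s.toList.length - 1) / 2) 0 with hF | hNF
    · exfalso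
      apply hp
      rw [hpal]
      intro j hj
      exact (hiff.mp hF) j (by omega) (by omega)
    · exact hNF.symm
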